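-- pv_equiv track=rewrite | github.com/lrainbowl/fa18-hw-ref | hw3.py | reverse_block
-- ===== SOURCE A (Python) =====
-- def reverse_block(arr, n):
--     if not arr or n > len(arr) or n <= 0:
--         return None
--     result = []
--     i = 0
--     while i < len(arr):
--         block = []
--         while len(block) < n and i < len(arr):
--             block.append(arr[i])
--             i += 1
--         block.reverse()
--         result.extend(block)
--     return result
-- ===== SOURCE B (Python) =====
-- def reverse_block(arr, n):
--     if not arr or n > len(arr) or n <= 0:
--         return None
--     L = len(arr)
--     result = []
--     for i in range(L):
--         b = (i // n) * n
--         e = min(b + n, L)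
--         result.append(arr[b + e - 1 - i])
--     return result
-- ===== Notes on version B (the rewrite author's own statement) =====
-- stated objective: alternative
-- what changed: A builds each block into a temporary list with nested while-loops, reverses it and extends the result; B is a single flat pass that maps every index i directly to its mirrored position within its block via b=(i//n)*n, e=min(b+n,len), arr[b+e-1-i], with no block buffer and no reversal.
import Mathlib
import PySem

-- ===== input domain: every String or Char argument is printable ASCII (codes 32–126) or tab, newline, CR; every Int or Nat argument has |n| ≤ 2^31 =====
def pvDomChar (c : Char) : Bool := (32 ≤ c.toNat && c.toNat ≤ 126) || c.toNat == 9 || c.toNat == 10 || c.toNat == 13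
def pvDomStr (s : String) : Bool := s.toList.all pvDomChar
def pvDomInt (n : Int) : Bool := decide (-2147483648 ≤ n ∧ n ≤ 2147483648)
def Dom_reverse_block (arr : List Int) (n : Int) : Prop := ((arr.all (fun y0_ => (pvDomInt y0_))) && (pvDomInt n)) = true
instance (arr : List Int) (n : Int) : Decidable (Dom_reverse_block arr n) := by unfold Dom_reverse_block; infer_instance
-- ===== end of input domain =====

-- B replaces A's nested while-loops (explicit block buffer, reverse, extend) by a single
-- flat pass that sends each index to its reversed counterpart within its block (alternative decomposition).

-- ===== PORT A =====
-- inner while loop: collect elements into `block` while len(block) < n and i < len(arr);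
-- fuel (= number of elements left) only makes the recursion structural, it never cuts the loop
def pvInnerA (arr : List Int) (n : Int) : Nat → List Int → Nat → List Int × Nat
  | 0, block, i => (block, i)
  | fuel + 1, block, i =>
    if h : (block.length : Int) < n ∧ i < arr.length then
      pvInnerA arr n fuel (block ++ [arr[i]'h.2]) (i + 1)
    else (block, i)

-- outer while loop; fuel = arr.length suffices because each iteration Python reaches
-- (the guard already returned None for n ≤ 0) advances i by at least one
def pvOuterA (arr : List Int) (n : Int) : Nat → List Int → Nat → List Int
  | 0, result, _ => result
  | fuel + 1, result, i =>
    if i < arr.length then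
      let p := pvInnerA arr n (arr.length - i) [] i
      pvOuterA arr n fuel (result ++ p.1.reverse) p.2
    else result

def reverse_block (arr : List Int) (n : Int) : Option (List Int) :=
  if arr = [] ∨ (arr.length : Int) < n ∨ n ≤ 0 then none
  else some (pvOuterA arr n arr.length [] 0)

-- ===== PORT B =====
-- single flat pass: position i is mapped to the mirrored position inside its block;
-- the index b + e - 1 - i is always in range, so pyGetD's default 0 is never used
def reverse_block_alt (arr : List Int) (n : Int) : Option (List Int) :=
  if arr = [] ∨ (arr.length : Int) < n ∨ n ≤ 0 then none
  else
    some ((PySem.List.pyRange 0 (arr.length : Int) 1).map (fun i =>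
      let b := PySem.Int.floordiv i n * n
      let e := min (b + n) (arr.length : Int)
      PySem.List.pyGetD arr (b + e - 1 - i) 0))

-- ===== PRECONDITION & SPEC =====
def Spec_reverse_block (arr : List Int) (n : Int) (out : Option (List Int)) : Prop := out = reverse_block_alt arr n
instance (arr : List Int) (n : Int) (out : Option (List Int)) : Decidable (Spec_reverse_block arr n out) := by unfold Spec_reverse_block; infer_instance

-- ===== CLAIM (what is proved, stated in full; the proofs are below) =====
def Claim_equal_reverse_block : Prop := ∀ (arr : List Int) (n : Int), Dom_reverse_block arr n → Spec_reverse_block arr n (reverse_block arr n)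

-- ===== LEMMAS AND PROOFS =====

-- canonical chunk recursion both sides are reduced to
def pvG (arr : List Int) (m : Nat) (hm : 0 < m) (b : Nat) : List Int :=
  if b < arr.length then ((arr.drop b).take m).reverse ++ pvG arr m hm (b + m) else []
termination_by arr.length - b
decreasing_by omega

theorem pvG_nil (arr : List Int) (m : Nat) (hm : 0 < m) (b : Nat) (h : arr.length ≤ b) :
    pvG arr m hm b = [] := by
  rw [pvG, if_neg (by omega)]

theorem pvInnerA_spec (arr : List Int) (n : Int) (hn : 0 < n) :
    ∀ fuel i block, arr.length - i ≤ fuel →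
      pvInnerA arr n fuel block i =
      (block ++ (arr.drop i).take (n.toNat - block.length),
       i + min (n.toNat - block.length) (arr.length - i)) := by
  intro fuel
  induction fuel with
  | zero =>
      intro i block hle
      have hi : arr.length ≤ i := by omega
      rw [pvInnerA]
      simp [List.drop_eq_nil_of_le hi, Nat.sub_eq_zero_of_le hi]
  | succ fuel ih =>
      intro i block hle
      rw [pvInnerA]
      by_cases h : (block.length : Int) < n ∧ i < arr.length
      · rw [dif_pos h, ih (i + 1) _ (by omega)]
        obtain ⟨hb, hi⟩ := h
        have hb' : block.length < n.toNat := by omega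
        have hdrop : arr.drop i = arr[i] :: arr.drop (i + 1) := List.drop_eq_getElem_cons hi
        have hlen : (block ++ [arr[i]]).length = block.length + 1 := by simp
        rw [Prod.mk.injEq]
        refine ⟨?_, ?_⟩
        · rw [hlen, List.append_assoc, List.singleton_append, hdrop]
          congr 1
          have h4 : n.toNat - block.length = (n.toNat - (block.length + 1)) + 1 := by omega
          rw [h4, List.take_succ_cons]
        · rw [hlen]; omega
      · rw [dif_neg h]
        rw [not_and_or] at h
        rcases h with h | h
        · have : n.toNat ≤ block.length := by omega
          simp [Nat.sub_eq_zero_of_le this]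
        · have : arr.length ≤ i := by omega
          simp [List.drop_eq_nil_of_le this, Nat.sub_eq_zero_of_le this]

theorem pvOuterA_spec (arr : List Int) (n : Int) (hn : 0 < n) :
    ∀ fuel i result, arr.length - i ≤ fuel * n.toNat →
      pvOuterA arr n fuel result i = result ++ pvG arr n.toNat (by omega) i := by
  intro fuel
  induction fuel with
  | zero =>
      intro i result hle
      rw [Nat.zero_mul] at hle
      rw [pvOuterA, pvG_nil arr n.toNat (by omega) i (by omega), List.append_nil]
  | succ fuel ih =>
      intro i result hle
      rw [pvOuterA]
      by_cases h : i < arr.length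
      · rw [if_pos h]
        show pvOuterA arr n fuel (result ++ (pvInnerA arr n (arr.length - i) [] i).1.reverse)
            (pvInnerA arr n (arr.length - i) [] i).2 = _
        rw [pvInnerA_spec arr n hn (arr.length - i) i [] (le_refl _)]
        simp only [List.nil_append, List.length_nil, Nat.sub_zero]
        conv_rhs => rw [pvG, if_pos h]
        have hle' : arr.length - (i + min n.toNat (arr.length - i)) ≤ fuel * n.toNat := by
          rw [Nat.succ_mul] at hle
          generalize fuel * n.toNat = M at hle ⊢
          omega
        rw [ih (i + min n.toNat (arr.length - i))
            (result ++ ((arr.drop i).take n.toNat).reverse) hle']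
        rw [List.append_assoc]
        congr 2
        by_cases hc : n.toNat ≤ arr.length - i
        · rw [Nat.min_eq_left hc]
        · rw [Nat.min_eq_right (by omega)]
          rw [pvG_nil arr n.toNat (by omega) (i + (arr.length - i)) (by omega),
              pvG_nil arr n.toNat (by omega) (i + n.toNat) (by omega)]
      · rw [if_neg h, pvG_nil arr n.toNat (by omega) i (by omega), List.append_nil]

-- one block of B's map equals the reversed slice
theorem pvSegment (arr : List Int) (n : Int) (hn : 0 < n)
    (b : Nat) (hb : (b : Int) % n = 0) (hblen : b < arr.length) :
    ((PySem.List.pyRange (b : Int) (min ((b : Int) + n) (arr.length : Int)) 1).map (fun i =>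
      let bi := PySem.Int.floordiv i n * n
      let e := min (bi + n) (arr.length : Int)
      PySem.List.pyGetD arr (bi + e - 1 - i) 0))
    = ((arr.drop b).take n.toNat).reverse := by
  have hbL : (b : Int) < (arr.length : Int) := by exact_mod_cast hblen
  obtain ⟨q, hq⟩ : n ∣ (b : Int) := Int.dvd_of_emod_eq_zero hb
  have hfd : ∀ i : Int, (b : Int) ≤ i → i < min ((b : Int) + n) (arr.length : Int) →
      PySem.Int.floordiv i n * n = (b : Int) := by
    intro i h1 h2
    have e1 : q * n = (b : Int) := by rw [mul_comm]; exact hq.symm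
    have hq' : PySem.Int.floordiv i n = q := by
      rw [PySem.Int.floordiv_eq_iff_of_pos hn]
      have e2 : (q + 1) * n = (b : Int) + n := by rw [add_mul, one_mul, e1]
      rw [e1, e2]
      omega
    rw [hq', e1]
  have hmap : (PySem.List.pyRange (b : Int) (min ((b : Int) + n) (arr.length : Int)) 1).map (fun i =>
      let bi := PySem.Int.floordiv i n * n
      let e := min (bi + n) (arr.length : Int)
      PySem.List.pyGetD arr (bi + e - 1 - i) 0)
      = (PySem.List.pyRange (b : Int) (min ((b : Int) + n) (arr.length : Int)) 1).map (fun i =>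
          PySem.List.pyGetD arr ((b : Int) + min ((b : Int) + n) (arr.length : Int) - 1 - i) 0) := by
    apply List.map_congr_left
    intro i hi
    rw [PySem.List.mem_pyRange_one] at hi
    simp only
    rw [hfd i hi.1 hi.2]
  rw [hmap]
  have htake : ((arr.drop b).take n.toNat).length
      = (min ((b : Int) + n) (arr.length : Int) - (b : Int)).toNat := by
    rw [List.length_take, List.length_drop]
    omega
  apply List.ext_getElem
  · rw [List.length_map, PySem.List.length_pyRange_one, List.length_reverse, htake]
  · intro k h1 h2
    rw [List.getElem_map, PySem.List.getElem_pyRange_one]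
    rw [List.getElem_reverse]
    simp only [List.getElem_take, List.getElem_drop]
    have hk : k < (min ((b : Int) + n) (arr.length : Int) - (b : Int)).toNat := by
      rw [List.length_map, PySem.List.length_pyRange_one] at h1; exact h1
    have hT : ((arr.drop b).take n.toNat).length = min n.toNat (arr.length - b) := by
      rw [List.length_take, List.length_drop]
    rw [List.length_reverse, hT] at h2
    have hge : (0 : Int) ≤ (b : Int) + min ((b : Int) + n) (arr.length : Int) - 1 - ((b : Int) + k) := by
      omega
    have hlt : (b : Int) + min ((b : Int) + n) (arr.length : Int) - 1 - ((b : Int) + k) < (arr.length : Int) := by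
      omega
    rw [PySem.List.pyGetD_eq_getElem arr 0 hge hlt]
    have hidx : ((b : Int) + min ((b : Int) + n) (arr.length : Int) - 1 - ((b : Int) + k)).toNat
        = b + (((arr.drop b).take n.toNat).length - 1 - k) := by
      rw [hT]; omega
    simp only [hidx]

-- B's flat map from a block boundary equals the chunk recursion
theorem pvB_eq_G (arr : List Int) (n : Int) (hn : 0 < n) :
    ∀ b : Nat, (b : Int) % n = 0 →
    ((PySem.List.pyRange (b : Int) (arr.length : Int) 1).map (fun i =>
      let bi := PySem.Int.floordiv i n * n
      let e := min (bi + n) (arr.length : Int)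
      PySem.List.pyGetD arr (bi + e - 1 - i) 0))
    = pvG arr n.toNat (by omega) b := by
  have htn : ((n.toNat : Int)) = n := Int.toNat_of_nonneg hn.le
  intro b
  induction b using pvG.induct arr n.toNat (by omega) with
  | case1 b hblen ih =>
    intro hb
    have hbL : (b : Int) < (arr.length : Int) := by exact_mod_cast hblen
    rw [PySem.List.pyRange_one_append (b : Int) (min ((b : Int) + n) (arr.length : Int))
          (arr.length : Int) (by omega) (by omega),
        List.map_append]
    rw [pvG, if_pos hblen]
    congr 1
    · exact pvSegment arr n hn b hb hblen
    · have hmod : ((b + n.toNat : Nat) : Int) % n = 0 := by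
        push_cast
        rw [htn, Int.add_emod_right]
        exact hb
      by_cases hfull : (b : Int) + n ≤ (arr.length : Int)
      · have heq : min ((b : Int) + n) (arr.length : Int) = ((b + n.toNat : Nat) : Int) := by
          push_cast; omega
        rw [heq]
        exact ih hmod
      · have heq : min ((b : Int) + n) (arr.length : Int) = (arr.length : Int) := by omega
        rw [heq, PySem.List.pyRange_one_eq_nil (le_refl _), List.map_nil,
            pvG_nil arr n.toNat (by omega) (b + n.toNat) (by omega)]
  | case2 b hblen =>
    intro hb
    rw [PySem.List.pyRange_one_eq_nil (by exact_mod_cast Nat.le_of_not_lt hblen), List.map_nil,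
        pvG_nil arr n.toNat (by omega) b (by omega)]

-- ===== VERDICT (by name: the statement is the Claim_ definition above) =====
theorem reverse_block_spec : Claim_equal_reverse_block := by
  intro arr n _
  unfold Spec_reverse_block reverse_block reverse_block_alt
  by_cases h : arr = [] ∨ (arr.length : Int) < n ∨ n ≤ 0
  · rw [if_pos h, if_pos h]
  · rw [if_neg h, if_neg h]
    rcases not_or.mp h with ⟨h1, h23⟩
    rcases not_or.mp h23 with ⟨h2, h3⟩
    have hn : 0 < n := by omega
    have hnL : n ≤ (arr.length : Int) := by omega
    congr 1
    rw [pvOuterA_spec arr n hn arr.length 0 [] (by have := Nat.le_mul_of_pos_right arr.length (show 0 < n.toNat by omega); omega), List.nil_append]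
    have := pvB_eq_G arr n hn 0 (by simp)
    simpa using this.symm
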